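-- pv_equiv track=rewrite | github.com/Rai220/anima | epoch_2/generation_2/stern_brocot.py | stern_brocot_bfs
-- ===== SOURCE A (Python) =====
-- def stern_brocot_bfs(max_level):
--     """BFS по дереву Штерна-Броко до заданного уровня."""
--     levels = {0: [(1, 1)]}
--
--     for level in range(1, max_level + 1):
--         new_level = []
--         for a, b in levels[level - 1]:
--             # Левый потомок: a/(a+b)
--             new_level.append((a, a + b))
--             # Правый потомок: (a+b)/b
--             new_level.append((a + b, b))
--         levels[level] = new_level
--
--     return levels
-- ===== SOURCE B (Python) =====
-- def stern_brocot_bfs(max_level):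
--     """Pre-order DFS (explicit stack) over the Stern-Brocot tree; per-level lists equal BFS order."""
--     levels = {}
--     stack = [(1, 1, 0)]
--     while stack:
--         a, b, level = stack.pop()
--         levels.setdefault(level, []).append((a, b))
--         if level < max_level:
--             stack.append((a + b, b, level + 1))
--             stack.append((a, a + b, level + 1))
--     return levels
-- ===== Notes on version B (the rewrite author's own statement) =====
-- stated objective: alternative
-- what changed: Replaces the iterative level-by-level BFS (each level built from the previous level's stored list) with an explicit-stack pre-order depth-first traversal that appends each node to its level's list; pre-order DFS visits each depth left-to-right, so every level list and the dict insertion order are identical.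
import Mathlib
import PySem

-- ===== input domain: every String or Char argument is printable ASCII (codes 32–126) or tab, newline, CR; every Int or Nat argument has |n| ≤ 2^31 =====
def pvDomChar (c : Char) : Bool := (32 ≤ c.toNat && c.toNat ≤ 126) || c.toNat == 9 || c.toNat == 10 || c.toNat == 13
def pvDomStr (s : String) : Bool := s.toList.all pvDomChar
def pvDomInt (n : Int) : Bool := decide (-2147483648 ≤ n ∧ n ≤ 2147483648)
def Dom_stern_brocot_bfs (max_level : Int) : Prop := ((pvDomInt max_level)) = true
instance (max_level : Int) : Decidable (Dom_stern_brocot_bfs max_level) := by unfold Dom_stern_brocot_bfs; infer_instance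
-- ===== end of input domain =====

-- B replaces the level-by-level BFS with a recursive pre-order DFS over the tree; same output (alternative decomposition, not faster).

-- ===== PORT A =====
-- levels[level-1] is always present when read (set on the previous iteration / initially), so getD is exact here.
def stern_brocot_bfs (max_level : Int) : List (Int × List (Int × Int)) :=
  let levels : PySem.Dict Int (List (Int × Int)) := PySem.Dict.ofList [(0, [(1, 1)])]
  let levels := (PySem.List.pyRange 1 (max_level + 1) 1).foldl
    (fun levels level =>
      let new_level := (levels.getD (level - 1) []).foldl
        (fun nl p => nl ++ [(p.1, p.1 + p.2), (p.1 + p.2, p.2)]) []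
      levels.insert level new_level) levels
  levels.items

-- ===== PORT B =====
-- 'levels.setdefault(level, []).append((a, b))' = overwrite key `level` in place with the appended list (exact: insert keeps position).
-- 'stack.pop()' takes the list head here (stack top = head); the two appends push right then left, so left is on top.
def sbLoop (max_level : Int) (stack : List (Int × Int × Int))
    (levels : PySem.Dict Int (List (Int × Int))) : PySem.Dict Int (List (Int × Int)) :=
  match stack with
  | [] => levels
  | (a, b, level) :: rest =>
    let levels := levels.insert level (levels.getD level [] ++ [(a, b)])
    if level < max_level then
      sbLoop max_level ((a, a + b, level + 1) :: (a + b, b, level + 1) :: rest) levels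
    else
      sbLoop max_level rest levels
termination_by (stack.map (fun t => 2 ^ ((max_level - t.2.2).toNat + 1) - 1)).sum
decreasing_by
  · simp only [List.map_cons, List.sum_cons]
    have hk : (max_level - (level + 1)).toNat + 1 = (max_level - level).toNat := by omega
    rw [hk]
    have h1 : 1 ≤ 2 ^ (max_level - level).toNat := Nat.one_le_two_pow
    have h2 : 2 ^ ((max_level - level).toNat + 1) = 2 * 2 ^ (max_level - level).toNat := by ring
    omega
  · simp only [List.map_cons, List.sum_cons]
    have h1 : 1 ≤ 2 ^ (max_level - level).toNat := Nat.one_le_two_pow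
    have h2 : 2 ^ ((max_level - level).toNat + 1) = 2 * 2 ^ (max_level - level).toNat := by ring
    omega

def stern_brocot_bfs_alt (max_level : Int) : List (Int × List (Int × Int)) :=
  (sbLoop max_level [(1, 1, 0)] PySem.Dict.empty).items

-- ===== PRECONDITION & SPEC =====
def Spec_stern_brocot_bfs (max_level : Int) (out : List (Int × List (Int × Int))) : Prop := out = stern_brocot_bfs_alt max_level
instance (max_level : Int) (out : List (Int × List (Int × Int))) : Decidable (Spec_stern_brocot_bfs max_level out) := by unfold Spec_stern_brocot_bfs; infer_instance

-- ===== CLAIM (what is proved, stated in full; the proofs are below) =====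
def Claim_equal_stern_brocot_bfs : Prop := ∀ (max_level : Int), Dom_stern_brocot_bfs max_level → Spec_stern_brocot_bfs max_level (stern_brocot_bfs max_level)

-- ===== LEMMAS AND PROOFS =====

-- one BFS step: both children of every node of a level, in order
def sbStep (xs : List (Int × Int)) : List (Int × Int) :=
  xs.flatMap (fun p => [(p.1, p.1 + p.2), (p.1 + p.2, p.2)])

-- the k-th level as A builds it
def sbLvl : Nat → List (Int × Int)
  | 0 => [(1, 1)]
  | k + 1 => sbStep (sbLvl k)

-- the contribution of a DFS rooted at (a, b) to depth d below it
def sbContrib : Nat → Int → Int → List (Int × Int)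
  | 0, a, b => [(a, b)]
  | d + 1, a, b => sbContrib d a (a + b) ++ sbContrib d (a + b) b

-- recursive one-node DFS: what one stack entry unfolds to (proof helper; the port is sbLoop)
def sbDfs (max_level : Int) (a b level : Int) (levels : PySem.Dict Int (List (Int × Int))) :
    PySem.Dict Int (List (Int × Int)) :=
  let levels := levels.insert level (levels.getD level [] ++ [(a, b)])
  if h : level < max_level then
    sbDfs max_level (a + b) b (level + 1) (sbDfs max_level a (a + b) (level + 1) levels)
  else
    levels
termination_by (max_level - level).toNat
decreasing_by all_goals omega

theorem loop_eq_dfs (m : Int) : ∀ (n : Nat) (a b level : Int), (m - level).toNat = n →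
    ∀ (rest : List (Int × Int × Int)) (d : PySem.Dict Int (List (Int × Int))),
    sbLoop m ((a, b, level) :: rest) d = sbLoop m rest (sbDfs m a b level d) := by
  intro n
  induction n with
  | zero =>
    intro a b level hn rest d
    rw [sbLoop, sbDfs]
    have h : ¬ level < m := by omega
    simp only [h, if_false, dite_false]
  | succ k ih =>
    intro a b level hn rest d
    rw [sbLoop, sbDfs]
    have h : level < m := by omega
    simp only [h, if_true, dite_true]
    rw [ih a (a + b) (level + 1) (by omega), ih (a + b) b (level + 1) (by omega)]

theorem sbStep_contrib (d : Nat) (a b : Int) :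
    sbStep (sbContrib d a b) = sbContrib (d + 1) a b := by
  induction d generalizing a b with
  | zero => simp [sbStep, sbContrib]
  | succ d ih => simp only [sbContrib, sbStep, List.flatMap_append] at *; rw [ih, ih]

theorem sbLvl_eq_contrib (k : Nat) : sbLvl k = sbContrib k 1 1 := by
  induction k with
  | zero => rfl
  | succ k ih => rw [sbLvl, ih, sbStep_contrib]

-- ---- A side: the loop builds the table of levels 0..n ----

def sbTable (n : Nat) : List (Int × List (Int × Int)) :=
  (List.range (n + 1)).map (fun (k : Nat) => ((k : Int), sbLvl k))

theorem sbTable_nodup_keys (n : Nat) : (PySem.Dict.mk (sbTable n)).keys.Nodup := by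
  simp only [PySem.Dict.keys, sbTable, List.map_map]
  exact (List.nodup_range).map (fun a b h => by simpa using h)

theorem sbTable_getD (n k : Nat) (hk : k ≤ n) :
    (PySem.Dict.mk (sbTable n)).getD (k : Int) [] = sbLvl k := by
  apply PySem.Dict.getD_of_mem_items
  · show _ ∈ sbTable n
    exact List.mem_map.2 ⟨k, List.mem_range.2 (by omega), rfl⟩
  · exact sbTable_nodup_keys n

theorem inner_fold (xs : List (Int × Int)) :
    xs.foldl (fun nl p => nl ++ [(p.1, p.1 + p.2), (p.1 + p.2, p.2)]) [] = sbStep xs := by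
  have := PySem.List.foldl_append_eq_flatMap (fun p : Int × Int => [(p.1, p.1 + p.2), (p.1 + p.2, p.2)]) xs ([])
  simpa [sbStep] using this

theorem table_not_contains (n : Nat) :
    (PySem.Dict.mk (sbTable n)).contains (1 + (n : Int)) = false := by
  rw [PySem.Dict.contains_eq_decide_mem_keys]
  simp only [PySem.Dict.keys, sbTable, List.map_map, decide_eq_false_iff_not]
  intro h
  obtain ⟨k, hk, he⟩ := List.mem_map.1 h
  simp only [Function.comp_apply, List.mem_range] at hk he; omega

theorem loopA (n : Nat) :
    (PySem.List.pyRange 1 (1 + (n : Int)) 1).foldl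
      (fun levels level =>
        let new_level := (levels.getD (level - 1) []).foldl
          (fun nl p => nl ++ [(p.1, p.1 + p.2), (p.1 + p.2, p.2)]) []
        levels.insert level new_level) (PySem.Dict.mk [((0 : Int), [((1 : Int), (1 : Int))])])
    = PySem.Dict.mk (sbTable n) := by
  induction n with
  | zero =>
    rw [PySem.List.pyRange_one_eq_nil (by norm_num : (1:Int) + ((0:Nat):Int) ≤ 1)]
    rfl
  | succ n ih =>
    rw [show (1 + ((n + 1 : Nat) : Int)) = (1 + (n : Int)) + 1 by push_cast; ring,
        PySem.List.pyRange_one_succ_right (by omega), List.foldl_append, ih]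
    simp only [List.foldl_cons, List.foldl_nil]
    have h1 : (1 + (n : Int)) - 1 = ((n : Nat) : Int) := by omega
    rw [h1, sbTable_getD n n le_rfl, inner_fold]
    apply PySem.Dict.ext
    rw [PySem.Dict.items_insert_of_not_contains _ _ (table_not_contains n)]
    show sbTable n ++ _ = sbTable (n + 1)
    simp only [sbTable, List.range_succ (n := n + 1), List.map_append]
    simp [sbLvl]
    omega

theorem portA_items (m : Int) : stern_brocot_bfs m = sbTable m.toNat := by
  have hr : PySem.List.pyRange 1 (m + 1) 1 = PySem.List.pyRange 1 (1 + (m.toNat : Int)) 1 := by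
    by_cases h : 0 ≤ m
    · congr 1; omega
    · rw [PySem.List.pyRange_one_eq_nil (by omega), PySem.List.pyRange_one_eq_nil (by omega)]
  simp only [stern_brocot_bfs]
  rw [hr]
  have h0 : (PySem.Dict.ofList [((0:Int), [((1:Int), (1:Int))])]) = PySem.Dict.mk [((0:Int), [((1:Int), (1:Int))])] := by rfl
  rw [h0, loopA]

-- ---- B side: what one DFS call does to the dict ----

-- the dict entries at keys level, level+1, … holding the given per-level lists
def entriesOf : Int → List (List (Int × Int)) → List (Int × List (Int × Int))
  | _, [] => []
  | level, s :: ss => (level, s) :: entriesOf (level + 1) ss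

theorem entriesOf_ge (ss : List (List (Int × Int))) : ∀ (level : Int),
    ∀ p ∈ entriesOf level ss, level ≤ p.1 := by
  induction ss with
  | nil => intro level p hp; simp [entriesOf] at hp
  | cons s ss ih =>
    intro level p hp
    rcases List.mem_cons.1 hp with h | h
    · rw [h]
    · have := ih (level + 1) p h; omega

theorem get?_mk_append_of_ne (base l : List (Int × List (Int × Int))) (k : Int)
    (h : ∀ p ∈ base, p.1 ≠ k) :
    (PySem.Dict.mk (base ++ l)).get? k = (PySem.Dict.mk l).get? k := by
  induction base with
  | nil => rfl
  | cons p base ih =>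
    rw [List.cons_append, PySem.Dict.get?_mk_cons]
    have hne : (p.1 == k) = false := by simp [h p (by simp)]
    rw [hne]
    simp only [Bool.false_eq_true, if_false]
    exact ih (fun q hq => h q (by simp [hq]))

theorem getD_map_range (g : Nat → List (Int × Int)) (n d : Nat) (h : d < n) :
    (((List.range n).map g).getD d []) = g d := by
  rw [List.getD_eq_getElem?_getD, List.getElem?_map, List.getElem?_range h]
  rfl

theorem contains_mk_iff (l : List (Int × List (Int × Int))) (k : Int) :
    (PySem.Dict.mk l).contains k = true ↔ k ∈ l.map Prod.fst := by
  rw [PySem.Dict.contains_eq_decide_mem_keys]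
  simp [PySem.Dict.keys]

theorem map_replace_id (l : List (Int × List (Int × Int))) (k : Int) (v : List (Int × Int))
    (h : ∀ p ∈ l, p.1 ≠ k) :
    l.map (fun p => if p.1 == k then (k, v) else p) = l := by
  conv_rhs => rw [← List.map_id l]
  apply List.map_congr_left
  intro p hp
  simp [h p hp]

-- the in-place effect of 'levels.setdefault(level, []).append(…)' on a dict of this shape
theorem insert_entries (base : List (Int × List (Int × Int))) (suffix : List (List (Int × Int)))
    (level : Int) (v : List (Int × Int)) (hb : ∀ p ∈ base, p.1 < level) :
    (PySem.Dict.mk (base ++ entriesOf level suffix)).insert level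
      ((PySem.Dict.mk (base ++ entriesOf level suffix)).getD level [] ++ v)
    = PySem.Dict.mk (base ++ entriesOf level ((suffix.getD 0 [] ++ v) :: suffix.tail)) := by
  have hbne : ∀ p ∈ base, p.1 ≠ level := fun p hp => ne_of_lt (hb p hp)
  apply PySem.Dict.ext
  cases suffix with
  | nil =>
    have hg : (PySem.Dict.mk (base ++ entriesOf level [])).getD level [] = [] := by
      rw [PySem.Dict.getD_eq_get?_getD, get?_mk_append_of_ne base _ level hbne]
      rfl
    have hc : (PySem.Dict.mk (base ++ entriesOf level [])).contains level = false := by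
      rw [Bool.eq_false_iff]
      intro hcon
      rcases List.mem_map.1 ((contains_mk_iff _ _).1 hcon) with ⟨p, hp, hpk⟩
      rw [List.mem_append] at hp
      rcases hp with hp | hp
      · exact hbne p hp hpk
      · simp [entriesOf] at hp
    rw [hg]
    rw [PySem.Dict.items_insert_of_not_contains _ _ hc]
    simp [entriesOf]
  | cons s ss =>
    have hg : (PySem.Dict.mk (base ++ entriesOf level (s :: ss))).getD level [] = s := by
      rw [PySem.Dict.getD_eq_get?_getD, get?_mk_append_of_ne base _ level hbne,
          show entriesOf level (s :: ss) = (level, s) :: entriesOf (level + 1) ss from rfl,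
          PySem.Dict.get?_mk_cons]
      simp
    have hc : (PySem.Dict.mk (base ++ entriesOf level (s :: ss))).contains level = true := by
      rw [contains_mk_iff]
      refine List.mem_map.2 ⟨(level, s), ?_, rfl⟩
      simp [entriesOf]
    rw [hg]
    rw [PySem.Dict.items_insert_of_contains _ _ hc]
    show (base ++ (level, s) :: entriesOf (level + 1) ss).map _ = _
    rw [List.map_append, map_replace_id base level _ hbne, List.map_cons]
    have h1 : ((level, s).1 == level) = true := by simp
    rw [h1]
    simp only [if_true]
    rw [map_replace_id _ level _ (fun p hp => by have := entriesOf_ge ss (level+1) p hp; omega)]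
    rfl

theorem getD_tail (suffix : List (List (Int × Int))) (d : Nat) :
    suffix.tail.getD d [] = suffix.getD (d + 1) [] := by
  cases suffix <;> simp [List.getD]

theorem tail_of_len_le_one (suffix : List (List (Int × Int))) (h : suffix.length ≤ 1) :
    suffix.tail = [] := by
  cases suffix with
  | nil => rfl
  | cons s ss => cases ss with
    | nil => rfl
    | cons t ts => simp at h

theorem entriesOf_split (base : List (Int × List (Int × Int))) (level : Int)
    (x : List (Int × Int)) (xs : List (List (Int × Int))) :
    base ++ entriesOf level (x :: xs) = (base ++ [(level, x)]) ++ entriesOf (level + 1) xs := by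
  simp [entriesOf]

theorem dfs_key (a b : Int) (suffix : List (List (Int × Int))) (k : Nat) :
    (List.range (k + 1 + 1)).map (fun d => suffix.getD d [] ++ sbContrib d a b)
    = (suffix.getD 0 [] ++ [(a, b)]) ::
      (List.range (k + 1)).map (fun d =>
        ((List.range (k + 1)).map
          (fun d => suffix.tail.getD d [] ++ sbContrib d a (a + b))).getD d []
        ++ sbContrib d (a + b) b) := by
  rw [List.range_succ_eq_map, List.map_cons, List.map_map]
  congr 1
  apply List.map_congr_left
  intro d hd
  rw [getD_map_range _ (k + 1) d (List.mem_range.1 hd), getD_tail]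
  simp only [Function.comp_apply, sbContrib, List.append_assoc]

-- the invariant: a DFS from (a,b) at `level` with fuel n appends sbContrib d a b to key level+d
theorem dfs_spec (m : Int) : ∀ (n : Nat) (a b level : Int), (m - level).toNat = n →
    ∀ (base : List (Int × List (Int × Int))) (suffix : List (List (Int × Int))),
    suffix.length ≤ n + 1 → (∀ p ∈ base, p.1 < level) →
    sbDfs m a b level (PySem.Dict.mk (base ++ entriesOf level suffix))
    = PySem.Dict.mk (base ++ entriesOf level
        ((List.range (n + 1)).map (fun d => suffix.getD d [] ++ sbContrib d a b))) := by
  intro n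
  induction n with
  | zero =>
    intro a b level hn base suffix hlen hb
    rw [sbDfs]
    have hnl : ¬ level < m := by omega
    simp only [hnl, dite_false]
    rw [insert_entries base suffix level [(a, b)] hb]
    rw [tail_of_len_le_one suffix hlen]
    rfl
  | succ k ih =>
    intro a b level hn base suffix hlen hb
    rw [sbDfs]
    have hl : level < m := by omega
    simp only [hl, dite_true]
    rw [insert_entries base suffix level [(a, b)] hb]
    rw [entriesOf_split]
    have hb' : ∀ p ∈ base ++ [(level, suffix.getD 0 [] ++ [(a, b)])], p.1 < level + 1 := by
      intro p hp
      rcases List.mem_append.1 hp with h | h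
      · have := hb p h; omega
      · simp at h; rw [h]; simp
    rw [ih a (a + b) (level + 1) (by omega) _ suffix.tail
        (by cases suffix <;> simp at hlen ⊢ <;> omega) hb']
    rw [ih (a + b) b (level + 1) (by omega) _
        ((List.range (k + 1)).map (fun d => suffix.tail.getD d [] ++ sbContrib d a (a + b)))
        (by simp) hb']
    rw [← entriesOf_split, dfs_key]

theorem entriesOf_map_range (n : Nat) : ∀ (g : Nat → List (Int × Int)) (level : Int),
    entriesOf level ((List.range n).map g)
    = (List.range n).map (fun (k : Nat) => (level + (k : Int), g k)) := by
  induction n with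
  | zero => intro g level; rfl
  | succ n ih =>
    intro g level
    rw [List.range_succ_eq_map, List.map_cons, List.map_cons, List.map_map, List.map_map]
    show (level, g 0) :: entriesOf (level + 1) _ = (level + ((0:Nat) : Int), g 0) :: _
    rw [ih]
    congr 1
    · simp
    · apply List.map_congr_left
      intro k _
      simp only [Function.comp_apply]
      congr 1
      push_cast; ring

theorem portB_items (m : Int) :
    stern_brocot_bfs_alt m
      = (List.range (m.toNat + 1)).map (fun (d : Nat) => ((d : Int), sbContrib d 1 1)) := by
  show (sbLoop m [(1, 1, 0)] PySem.Dict.empty).items = _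
  rw [loop_eq_dfs m m.toNat 1 1 0 (by omega), sbLoop]
  have h0 : (PySem.Dict.empty : PySem.Dict Int (List (Int × Int)))
      = PySem.Dict.mk ([] ++ entriesOf 0 []) := rfl
  rw [h0, dfs_spec m m.toNat 1 1 0 (by omega) [] [] (by simp) (by simp)]
  show entriesOf 0 ((List.range (m.toNat + 1)).map fun d => ([] : List (List (Int×Int))).getD d [] ++ sbContrib d 1 1) = _
  have : ((List.range (m.toNat + 1)).map fun d => ([] : List (List (Int×Int))).getD d [] ++ sbContrib d 1 1)
      = (List.range (m.toNat + 1)).map (fun d => sbContrib d 1 1) := by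
    apply List.map_congr_left; intro d _; simp [List.getD]
  rw [this, entriesOf_map_range]
  apply List.map_congr_left
  intro k _
  simp

-- ===== VERDICT (by name: the statement is the Claim_ definition above) =====
theorem stern_brocot_bfs_spec : Claim_equal_stern_brocot_bfs := by
  intro m _
  show _ = _
  rw [portA_items, portB_items, sbTable]
  exact List.map_congr_left (fun k _ => by rw [sbLvl_eq_contrib])
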